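-- pv_equiv track=rewrite | github.com/hikarinessa/advent_2020 | advent_2020_hikarinessa/advent_06.py | same_answer
-- ===== SOURCE A (Python) =====
-- def same_answer(group_list):
--     """Given a list where elements are group answers, split by a space
--     returns the compound number of elements that appear on all answers of each group.
--     input = ['f f f f', 'dbifho zmdh hobd']
--     1 element is common to all answers of the first group
--     2 elements (h, d) are common to all answers of the second group
--     function returns 3 (1 + 2)
--     """
--     total_answers = 0
--
--     for group_answer in range(len(group_list)):
--         split_list = group_list[group_answer].split()
--
--         answers = split_list[0]
--         for answer in split_list:
--             answers = set(answers).intersection(answer)  # set intersection preserves repeated values (Boolean)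
--
--         total_answers += len(answers)
--
--     return total_answers
-- ===== SOURCE B (Python) =====
-- def same_answer(group_list):
--     """Counter-based: for each group count, per character, in how many
--     answers it occurs (once per distinct character per answer); a char
--     common to all answers is counted len(words) times."""
--     total = 0
--     for group in group_list:
--         words = group.split()
--         counts = {}
--         for w in words:
--             for c in set(w):
--                 counts[c] = counts.get(c, 0) + 1
--         total += sum(1 for v in counts.values() if v == len(words))
--     return total
-- ===== Notes on version B (the rewrite author's own statement) =====
-- stated objective: alternative
-- what changed: Replaces the iterated set-intersection starting from the first answer by a single pass that builds a per-group character counter (one increment per distinct char per answer) and counts the characters whose count equals the number of answers.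
-- outside the precondition, e.g. on same_answer(['']): A raises IndexError, B returns 0
import Mathlib
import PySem

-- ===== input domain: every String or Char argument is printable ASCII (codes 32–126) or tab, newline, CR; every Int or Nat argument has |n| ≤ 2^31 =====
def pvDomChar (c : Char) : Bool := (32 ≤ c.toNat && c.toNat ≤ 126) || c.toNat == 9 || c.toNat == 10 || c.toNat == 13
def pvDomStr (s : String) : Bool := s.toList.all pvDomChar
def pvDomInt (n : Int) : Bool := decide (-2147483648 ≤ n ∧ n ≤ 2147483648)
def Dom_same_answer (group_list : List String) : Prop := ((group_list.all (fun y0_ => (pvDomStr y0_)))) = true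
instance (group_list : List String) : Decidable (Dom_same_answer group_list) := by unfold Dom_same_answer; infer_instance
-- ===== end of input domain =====

-- B replaces A's iterated set-intersection per group by a one-pass per-group character
-- counter (one increment per distinct char per answer), counting chars whose count equals
-- the number of answers; an alternative decomposition, not claimed faster.

-- ===== PORT A =====
def same_answer (group_list : List String) : Int :=
  group_list.foldl (fun total_answers g =>
    let split_list := PySem.Str.split₀ g
    -- split_list[0]: Python raises IndexError when split_list = []; those inputs are outside Pre_
    let answers0 := split_list.headD ""
    let answers := split_list.foldl
      (fun acc answer => acc.filter (fun c => answer.toList.contains c))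
      (PySem.Set.ofList answers0.toList)
    total_answers + (answers.length : Int)) 0

-- ===== PORT B =====
def same_answer_alt (group_list : List String) : Int :=
  group_list.foldl (fun total g =>
    let words := PySem.Str.split₀ g
    let counts := words.foldl
      (fun d w => (PySem.Set.ofList w.toList).foldl
        (fun d c => d.insert c (d.getD c 0 + 1)) d)
      PySem.Dict.empty
    total + ((counts.values.filter (fun v => v == (words.length : Int))).length : Int)) 0

-- ===== PRECONDITION & SPEC =====
-- Pre_ excludes exactly the inputs on which A raises IndexError: lists containing a group
-- whose split() is empty (an empty or all-whitespace group string).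
def Pre_same_answer (group_list : List String) : Prop :=
  ∀ g ∈ group_list, PySem.Str.split₀ g ≠ []
instance (group_list : List String) : Decidable (Pre_same_answer group_list) := by
  unfold Pre_same_answer; infer_instance

def pvWitness_same_answer : List String := ["f f f f", "dbifho zmdh hobd"]

def Spec_same_answer (group_list : List String) (out : Int) : Prop := out = same_answer_alt group_list
instance (group_list : List String) (out : Int) : Decidable (Spec_same_answer group_list out) := by unfold Spec_same_answer; infer_instance

-- ===== CLAIM (what is proved, stated in full; the proofs are below) =====
def Claim_equal_same_answer : Prop := ∀ (group_list : List String), Dom_same_answer group_list → Pre_same_answer group_list → Spec_same_answer group_list (same_answer group_list)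

-- ===== LEMMAS AND PROOFS =====

-- A's per-group iterated intersection is a filter by "contained in every answer".
lemma foldl_filter_eq (p : String → Char → Bool) (ws : List String) (l0 : List Char) :
    ws.foldl (fun acc w => acc.filter (p w)) l0
      = l0.filter (fun c => ws.all (fun w => p w c)) := by
  induction ws generalizing l0 with
  | nil => simp
  | cons w ws ih =>
    simp only [List.foldl_cons, ih, List.filter_filter, List.all_cons]
    exact List.filter_congr (fun c _ => by simp [Bool.and_comm])

-- a Python set of the chars of w contributes count 1 to c exactly when c ∈ w
lemma count_set_ofList (l : List Char) (c : Char) :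
    (PySem.Set.ofList l).count c = if c ∈ l then 1 else 0 := by
  by_cases h : c ∈ l
  · simp only [h, if_true]
    exact List.count_eq_one_of_mem (PySem.Set.nodup_ofList l) ((PySem.Set.mem_ofList l c).mpr h)
  · simp only [h, if_false]
    exact List.count_eq_zero.mpr (fun hc => h ((PySem.Set.mem_ofList l c).mp hc))

-- B's counter: value at c = number of answers containing c (distinct chars per answer).
lemma getD_group_fold (ws : List String) (d : PySem.Dict Char Int) (c : Char) :
    (ws.foldl (fun d w => (PySem.Set.ofList w.toList).foldl
        (fun d c => d.insert c (d.getD c 0 + 1)) d) d).getD c 0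
      = d.getD c 0 + (ws.countP (fun w => w.toList.contains c) : Int) := by
  induction ws generalizing d with
  | nil => simp
  | cons w ws ih =>
    simp only [List.foldl_cons, ih, PySem.Dict.getD_foldl_insert_add_one,
      count_set_ofList, List.countP_cons]
    by_cases h : c ∈ w.toList
    · simp [h]; ring
    · simp [h]

-- B's counter keys: exactly the chars occurring in some answer of the group.
lemma mem_keys_group_fold (ws : List String) (d : PySem.Dict Char Int) (c : Char) :
    c ∈ (ws.foldl (fun d w => (PySem.Set.ofList w.toList).foldl
        (fun d c => d.insert c (d.getD c 0 + 1)) d) d).keys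
      ↔ c ∈ d.keys ∨ ∃ w ∈ ws, c ∈ w.toList := by
  induction ws generalizing d with
  | nil => simp
  | cons w ws ih =>
    simp only [List.foldl_cons, ih, PySem.Dict.keys_foldl_insert, PySem.Set.mem_update,
      PySem.Set.mem_ofList, List.mem_cons]
    constructor
    · rintro (⟨h | h⟩ | ⟨w', hw', hc⟩)
      · exact Or.inl h
      · exact Or.inr ⟨w, Or.inl rfl, h⟩
      · exact Or.inr ⟨w', Or.inr hw', hc⟩
    · rintro (h | ⟨w', hw' | hw', hc⟩)
      · exact Or.inl (Or.inl h)
      · exact Or.inl (Or.inr (hw' ▸ hc))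
      · exact Or.inr ⟨w', hw', hc⟩

lemma nodup_keys_group_fold (ws : List String) (d : PySem.Dict Char Int)
    (hd : d.keys.Nodup) :
    (ws.foldl (fun d w => (PySem.Set.ofList w.toList).foldl
        (fun d c => d.insert c (d.getD c 0 + 1)) d) d).keys.Nodup := by
  induction ws generalizing d with
  | nil => exact hd
  | cons w ws ih =>
    exact ih _ (PySem.Dict.nodup_keys_foldl_insert _ _ _ hd)

-- the per-group equality: A's intersection size = B's count of full-count chars
lemma group_eq (ws : List String) (hne : ws ≠ []) :
    (((ws.foldl (fun acc answer => acc.filter (fun c => answer.toList.contains c))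
        (PySem.Set.ofList (ws.headD "").toList)).length : Int))
      = ((((ws.foldl (fun d w => (PySem.Set.ofList w.toList).foldl
            (fun d c => d.insert c (d.getD c 0 + 1)) d) PySem.Dict.empty).values.filter
              (fun v => v == (ws.length : Int))).length : Int)) := by
  obtain ⟨w0, rest, rfl⟩ := List.exists_cons_of_ne_nil hne
  set ws := w0 :: rest with hws
  set counts := ws.foldl (fun d w => (PySem.Set.ofList w.toList).foldl
      (fun d c => d.insert c (d.getD c 0 + 1)) d) (PySem.Dict.empty : PySem.Dict Char Int) with hcounts
  have hnd : counts.keys.Nodup := nodup_keys_group_fold ws _ (by simp [PySem.Dict.keys, PySem.Dict.empty])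
  have hvals : counts.values = counts.keys.map (fun k => counts.getD k 0) :=
    PySem.Dict.values_eq_map_keys counts hnd 0
  rw [foldl_filter_eq, hvals, List.filter_map]
  rw [List.length_map]
  congr 1
  apply List.Perm.length_eq
  apply (List.perm_ext_iff_of_nodup
    ((PySem.Set.nodup_ofList _).filter _) (hnd.filter _)).mpr
  intro c
  have hgetD : counts.getD c 0 = (ws.countP (fun w => w.toList.contains c) : Int) := by
    rw [hcounts, getD_group_fold]; simp [PySem.Dict.getD, PySem.Dict.get?, PySem.Dict.empty]
  have hmemK : c ∈ counts.keys ↔ ∃ w ∈ ws, c ∈ w.toList := by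
    rw [hcounts, mem_keys_group_fold]; simp [PySem.Dict.keys, PySem.Dict.empty]
  simp only [List.mem_filter, Function.comp, PySem.Set.mem_ofList, hmemK, hgetD,
    List.all_eq_true, List.contains_iff_mem, beq_iff_eq, Nat.cast_inj]
  rw [List.countP_eq_length]
  constructor
  · rintro ⟨hc0, hall⟩
    exact ⟨⟨w0, List.mem_cons_self, by simpa using hc0⟩,
      fun w hw => by simpa using hall w hw⟩
  · rintro ⟨⟨w', hw', hc'⟩, hall⟩
    exact ⟨by simpa using hall w0 List.mem_cons_self,
      fun w hw => by simpa using hall w hw⟩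

-- the running totals agree group by group
lemma total_fold (gl : List String) (pre : ∀ g ∈ gl, PySem.Str.split₀ g ≠ []) (t : Int) :
    gl.foldl (fun total_answers g =>
      let split_list := PySem.Str.split₀ g
      let answers0 := split_list.headD ""
      let answers := split_list.foldl
        (fun acc answer => acc.filter (fun c => answer.toList.contains c))
        (PySem.Set.ofList answers0.toList)
      total_answers + (answers.length : Int)) t
    = gl.foldl (fun total g =>
      let words := PySem.Str.split₀ g
      let counts := words.foldl
        (fun d w => (PySem.Set.ofList w.toList).foldl
          (fun d c => d.insert c (d.getD c 0 + 1)) d)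
        PySem.Dict.empty
      total + ((counts.values.filter (fun v => v == (words.length : Int))).length : Int)) t := by
  induction gl generalizing t with
  | nil => rfl
  | cons g gs ih =>
    simp only [List.foldl_cons]
    rw [show t + _ = t + _ from
      congrArg (t + ·) (group_eq (PySem.Str.split₀ g) (pre g List.mem_cons_self))]
    exact ih (fun x hx => pre x (List.mem_cons_of_mem g hx)) _

-- ===== VERDICT (by name: the statement is the Claim_ definition above) =====
theorem same_answer_spec : Claim_equal_same_answer := by
  intro gl _ pre
  unfold Spec_same_answer same_answer same_answer_alt
  exact total_fold gl pre 0
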